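-- pv_equiv track=rewrite | github.com/Savemeister/ProjectSSAAP1 | ProjectSSAAP.py | CoprimeTest
-- ===== SOURCE A (Python) =====
-- def CoprimeTest(z,E): # Тест на простоту
--     while z != 0 and E != 0:
--         if z > E:
--             z %= E
--         else:
--             E %= z
--     if z + E == 1:
--         return True
--     else:
--         return False
-- ===== SOURCE B (Python) =====
-- def CoprimeTest(z, E):
--     # binary (Stein) gcd on absolute values: parity cases + subtraction,
--     # no modulo reduction; coprime iff that gcd is 1
--     a, b = abs(z), abs(E)
--     if a == 0:
--         return b == 1
--     if b == 0:
--         return a == 1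
--     if a % 2 == 0 and b % 2 == 0:
--         return False
--     while a % 2 == 0:
--         a //= 2
--     while b % 2 == 0:
--         b //= 2
--     while a != b:
--         if a > b:
--             a -= b
--             while a % 2 == 0:
--                 a //= 2
--         else:
--             b -= a
--             while b % 2 == 0:
--                 b //= 2
--     return a == 1
-- ===== Notes on version B (the rewrite author's own statement) =====
-- stated objective: alternative
-- what changed: A reduces the pair with Python's modulo in a larger-side-in-place Euclidean loop and tests z+E==1; B runs the binary (Stein) gcd on the absolute values - parity checks, halving out factors of two and odd-odd subtraction, no modulo at all - and tests whether that gcd is 1.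
-- intended difference: On terminating inputs with z = -1 or E = -1 A returns False (its loop ends with the pair summing to -1) although the two numbers are coprime, while B returns True, the intended answer for a coprimality test. — e.g. on CoprimeTest(-1, 2): A returns false, B returns true
import Mathlib
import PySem

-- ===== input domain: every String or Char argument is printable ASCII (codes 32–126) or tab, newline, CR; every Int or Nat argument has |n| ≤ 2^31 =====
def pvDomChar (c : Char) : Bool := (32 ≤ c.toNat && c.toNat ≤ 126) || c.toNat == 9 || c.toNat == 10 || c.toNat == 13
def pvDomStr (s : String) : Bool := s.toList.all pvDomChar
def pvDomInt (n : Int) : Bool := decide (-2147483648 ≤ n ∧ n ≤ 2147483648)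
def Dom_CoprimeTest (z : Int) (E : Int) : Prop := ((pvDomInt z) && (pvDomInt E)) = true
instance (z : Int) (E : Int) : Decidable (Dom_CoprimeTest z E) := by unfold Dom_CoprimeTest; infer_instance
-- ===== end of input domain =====

-- B replaces A's modulo-based Euclidean reduction loop by the binary (Stein) gcd on
-- absolute values — parity tests, halving and subtraction, no modulo (objective: alternative).

-- ===== PORT A =====
-- A's while-loop; the fuel argument only makes it a total Lean function — Pre_ guarantees
-- the fuel suffices (on inputs outside Pre_ the Python loop never terminates).
def pvLoopA : Nat → Int → Int → Int × Int
  | 0, z, E => (z, E)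
  | n+1, z, E =>
    if z ≠ 0 ∧ E ≠ 0 then
      if z > E then pvLoopA n (PySem.Int.mod z E) E
      else pvLoopA n z (PySem.Int.mod E z)
    else (z, E)

def CoprimeTest (z : Int) (E : Int) : Bool :=
  let p := pvLoopA (z.natAbs + E.natAbs + 1) z E
  decide (p.1 + p.2 = 1)

-- ===== PORT B =====
-- `while a % 2 == 0: a //= 2`; the fuel (= the starting value) only makes it total,
-- B only runs it on positive arguments where it terminates.
def pvStrip : Nat → Nat → Nat
  | 0, a => a
  | f+1, a => if a % 2 = 0 then pvStrip f (a / 2) else a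

-- `while a != b: …` subtraction loop of Source B; fuel a+b suffices (sum strictly decreases).
def pvSteinLoop : Nat → Nat → Nat → Nat
  | 0, a, _ => a
  | f+1, a, b =>
    if a ≠ b then
      if a > b then pvSteinLoop f (pvStrip (a-b) (a-b)) b
      else pvSteinLoop f a (pvStrip (b-a) (b-a))
    else a

def CoprimeTest_alt (z : Int) (E : Int) : Bool :=
  let a0 := z.natAbs
  let b0 := E.natAbs
  if a0 = 0 then decide (b0 = 1)
  else if b0 = 0 then decide (a0 = 1)
  else if a0 % 2 = 0 ∧ b0 % 2 = 0 then false
  else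
    let a1 := pvStrip a0 a0
    let b1 := pvStrip b0 b0
    decide (pvSteinLoop (a1 + b1) a1 b1 = 1)

-- ===== PRECONDITION & SPEC =====
-- Pre_ = exactly the inputs on which A's while loop terminates: both arguments non-negative,
-- or one negative argument dividing the other non-negative one, or two equal negatives;
-- on every other input A loops forever (Python's % keeps the smaller-side value fixed).
def Pre_CoprimeTest (z : Int) (E : Int) : Prop :=
  (0 ≤ z ∧ 0 ≤ E) ∨
  (z < 0 ∧ 0 ≤ E ∧ PySem.Int.mod E z = 0) ∨
  (0 ≤ z ∧ E < 0 ∧ PySem.Int.mod z E = 0) ∨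
  (z < 0 ∧ E < 0 ∧ z = E)
instance (z : Int) (E : Int) : Decidable (Pre_CoprimeTest z E) := by unfold Pre_CoprimeTest; infer_instance

def pvWitness_CoprimeTest : Int × Int := (6, 35)

-- On terminating inputs with z = -1 or E = -1 A returns False although gcd is 1
-- (its final sum is -1, not 1); B returns True, the intended answer for a coprimality test.
def D_CoprimeTest (z : Int) (E : Int) : Prop := z = -1 ∨ E = -1
instance (z : Int) (E : Int) : Decidable (D_CoprimeTest z E) := by unfold D_CoprimeTest; infer_instance

def Spec_CoprimeTest (z : Int) (E : Int) (out : Bool) : Prop := ¬ D_CoprimeTest z E → out = CoprimeTest_alt z E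
instance (z : Int) (E : Int) (out : Bool) : Decidable (Spec_CoprimeTest z E out) := by unfold Spec_CoprimeTest; infer_instance

def pvDiffWitness_CoprimeTest : Int × Int := (-1, 2)
def pvDiffWitnessOut_CoprimeTest : Bool × Bool := (false, true)

-- ===== CLAIM (what is proved, stated in full; the proofs are below) =====
def Claim_unchanged_CoprimeTest : Prop := ∀ (z : Int) (E : Int), Dom_CoprimeTest z E → Pre_CoprimeTest z E → Spec_CoprimeTest z E (CoprimeTest z E)
def Claim_changed_CoprimeTest : Prop := Dom_CoprimeTest (pvDiffWitness_CoprimeTest.1) (pvDiffWitness_CoprimeTest.2) ∧ Pre_CoprimeTest (pvDiffWitness_CoprimeTest.1) (pvDiffWitness_CoprimeTest.2) ∧ D_CoprimeTest (pvDiffWitness_CoprimeTest.1) (pvDiffWitness_CoprimeTest.2) ∧ CoprimeTest (pvDiffWitness_CoprimeTest.1) (pvDiffWitness_CoprimeTest.2) = pvDiffWitnessOut_CoprimeTest.1 ∧ CoprimeTest_alt (pvDiffWitness_CoprimeTest.1) (pvDiffWitness_CoprimeTest.2) = pvDiffWitnessOut_CoprimeTest.2 ∧ pvDiffWitnessOut_CoprimeTest.1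 ≠ pvDiffWitnessOut_CoprimeTest.2
def Claim_exact_CoprimeTest : Prop := ∀ (z : Int) (E : Int), Dom_CoprimeTest z E → Pre_CoprimeTest z E → D_CoprimeTest z E → CoprimeTest z E ≠ CoprimeTest_alt z E

-- ===== LEMMAS AND PROOFS =====

-- gcd is invariant under taking the remainder of the first argument
theorem pvGcdEmodLeft (a b : Int) : Int.gcd (a % b) b = Int.gcd a b := by
  rw [Int.emod_def, sub_eq_add_neg, ← mul_neg]
  exact Int.gcd_add_mul_left_left b a (-(a / b))

theorem pvModSelf (a : Int) : PySem.Int.mod a a = 0 :=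
  (PySem.Int.mod_eq_zero_iff_dvd a a).mpr dvd_rfl

theorem pvModNegOne (a : Int) : PySem.Int.mod a (-1) = 0 :=
  (PySem.Int.mod_eq_zero_iff_dvd a (-1)).mpr ⟨-a, by ring⟩

-- once one side is 0 the loop stops
theorem pvLoopAStopRight (n : Nat) (z : Int) : pvLoopA (n+1) z 0 = (z, 0) := by
  rw [pvLoopA]; simp

theorem pvLoopAStopLeft (n : Nat) (E : Int) : pvLoopA (n+1) 0 E = (0, E) := by
  rw [pvLoopA]; simp

-- A's loop, given enough fuel, on non-negative inputs: final components sum to the gcd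
theorem pvLoopA_gcd (n : Nat) : ∀ (z E : Int), 0 ≤ z → 0 ≤ E → z.natAbs + E.natAbs < n →
    (pvLoopA n z E).1 + (pvLoopA n z E).2 = (Int.gcd z E : Int) := by
  induction n with
  | zero => intro z E _ _ h; omega
  | succ n ih =>
    intro z E hz hE h
    rw [pvLoopA]
    by_cases hc : z ≠ 0 ∧ E ≠ 0
    · rw [if_pos hc]
      obtain ⟨hz0, hE0⟩ := hc
      by_cases hgt : z > E
      · rw [if_pos hgt]
        have hEpos : 0 < E := lt_of_le_of_ne hE (Ne.symm hE0)
        have hmod : PySem.Int.mod z E = z % E := PySem.Int.mod_eq_emod_of_pos hEpos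
        have h3 : 0 ≤ z % E := Int.emod_nonneg _ hE0
        have h4 : z % E < E := Int.emod_lt_of_pos _ hEpos
        rw [hmod, ih _ _ h3 hE (by omega), pvGcdEmodLeft]
      · rw [if_neg hgt]
        have hzpos : 0 < z := lt_of_le_of_ne hz (Ne.symm hz0)
        have hmod : PySem.Int.mod E z = E % z := PySem.Int.mod_eq_emod_of_pos hzpos
        have h3 : 0 ≤ E % z := Int.emod_nonneg _ hz0
        have h4 : E % z < z := Int.emod_lt_of_pos _ hzpos
        rw [hmod, ih _ _ hz h3 (by omega), Int.gcd_comm, pvGcdEmodLeft, Int.gcd_comm]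
    · rw [if_neg hc]
      simp only [ne_eq, not_and, not_not] at hc
      by_cases hz0 : z = 0
      · subst hz0; simp only [Int.gcd_zero_left]; omega
      · have hE0 : E = 0 := hc hz0
        subst hE0; simp only [Int.gcd_zero_right]; omega

-- pvStrip facts
theorem pvStrip_le (f : Nat) : ∀ a, pvStrip f a ≤ a := by
  induction f with
  | zero => intro a; rw [pvStrip]
  | succ f ih =>
    intro a; rw [pvStrip]
    split
    · exact le_trans (ih _) (Nat.div_le_self _ _)
    · exact le_rfl

theorem pvStrip_odd (f : Nat) : ∀ a, 0 < a → a ≤ f → (pvStrip f a) % 2 = 1 := by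
  induction f with
  | zero => intro a h hf; omega
  | succ f ih =>
    intro a h hf; rw [pvStrip]
    split
    · rename_i he; exact ih _ (by omega) (by omega)
    · omega

theorem pvStrip_of_odd (f : Nat) (a : Nat) (h : a % 2 = 1) : pvStrip f a = a := by
  cases f with
  | zero => rw [pvStrip]
  | succ f => rw [pvStrip]; rw [if_neg (by omega)]

theorem pvStrip_gcd (f : Nat) : ∀ a b, b % 2 = 1 → Nat.gcd (pvStrip f a) b = Nat.gcd a b := by
  induction f with
  | zero => intro a b _; rw [pvStrip]
  | succ f ih =>
    intro a b hb; rw [pvStrip]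
    split
    · rename_i he
      rw [ih _ _ hb]
      have h2 : a = 2 * (a / 2) := by omega
      have hco : Nat.Coprime 2 b := by
        rw [Nat.coprime_two_left, Nat.odd_iff]; exact hb
      conv_rhs => rw [h2]
      rw [Nat.Coprime.gcd_mul_left_cancel _ hco]
    · rfl

-- first unfolding of pvStrip on an even positive argument: result ≤ a/2
theorem pvStrip_half (a : Nat) (hpos : 0 < a) (he : a % 2 = 0) : pvStrip a a ≤ a / 2 := by
  obtain ⟨f, hf⟩ : ∃ f, a = f + 1 := ⟨a - 1, by omega⟩
  subst hf
  rw [pvStrip, if_pos he]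
  exact pvStrip_le _ _

-- the subtraction loop on two odd numbers computes their gcd
theorem pvSteinLoop_gcd (f : Nat) : ∀ a b, a % 2 = 1 → b % 2 = 1 → a + b ≤ f →
    pvSteinLoop f a b = Nat.gcd a b := by
  induction f with
  | zero => intro a b ha hb h; omega
  | succ f ih =>
    intro a b ha hb h
    rw [pvSteinLoop]
    by_cases hne : a ≠ b
    · rw [if_pos hne]
      by_cases hgt : a > b
      · rw [if_pos hgt]
        have hd : (a - b) % 2 = 0 := by omega
        have hdpos : 0 < a - b := by omega
        have hso := pvStrip_odd (a-b) (a-b) hdpos le_rfl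
        have hsh := pvStrip_half (a-b) hdpos hd
        rw [ih _ _ hso hb (by omega), pvStrip_gcd _ _ _ hb]
        exact Nat.gcd_sub_self_left (by omega)
      · rw [if_neg hgt]
        have hd : (b - a) % 2 = 0 := by omega
        have hdpos : 0 < b - a := by omega
        have hso := pvStrip_odd (b-a) (b-a) hdpos le_rfl
        have hsh := pvStrip_half (b-a) hdpos hd
        rw [ih _ _ ha hso (by omega), Nat.gcd_comm a (pvStrip (b-a) (b-a)),
          pvStrip_gcd _ _ _ ha, Nat.gcd_sub_self_left (by omega), Nat.gcd_comm]
    · rw [if_neg hne]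
      simp only [ne_eq, not_not] at hne
      subst hne
      rw [Nat.gcd_self]

-- B computes exactly `gcd |z| |E| == 1`
theorem pvAlt_eq_gcd (z E : Int) :
    CoprimeTest_alt z E = decide (Nat.gcd z.natAbs E.natAbs = 1) := by
  simp only [CoprimeTest_alt]
  by_cases ha0 : z.natAbs = 0
  · rw [if_pos ha0, ha0]
    exact decide_eq_decide.mpr (by rw [Nat.gcd_zero_left])
  rw [if_neg ha0]
  by_cases hb0 : E.natAbs = 0
  · rw [if_pos hb0, hb0]
    exact decide_eq_decide.mpr (by rw [Nat.gcd_zero_right])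
  rw [if_neg hb0]
  by_cases hee : z.natAbs % 2 = 0 ∧ E.natAbs % 2 = 0
  · rw [if_pos hee]
    have h2 : 2 ∣ Nat.gcd z.natAbs E.natAbs :=
      Nat.dvd_gcd (by omega) (by omega)
    symm; rw [decide_eq_false_iff_not]
    intro h1; rw [h1] at h2; omega
  · rw [if_neg hee]
    have ha := pvStrip_odd z.natAbs z.natAbs (by omega) le_rfl
    have hb := pvStrip_odd E.natAbs E.natAbs (by omega) le_rfl
    rw [pvSteinLoop_gcd _ _ _ ha hb le_rfl]
    congr 1
    by_cases hza : z.natAbs % 2 = 1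
    · rw [pvStrip_of_odd _ _ hza, Nat.gcd_comm, pvStrip_gcd _ _ _ hza, Nat.gcd_comm]
    · have hEb : E.natAbs % 2 = 1 := by omega
      rw [pvStrip_of_odd _ _ hEb, pvStrip_gcd _ _ _ hEb]

-- z divides E → gcd z E = |z|
theorem pvGcdOfDvd (z E : Int) (h : z ∣ E) : Int.gcd z E = z.natAbs :=
  Nat.gcd_eq_left (Int.natAbs_dvd_natAbs.mpr h)

-- ===== VERDICT (by name: the statement is the Claim_ definition above) =====
theorem CoprimeTest_spec : Claim_unchanged_CoprimeTest := by
  intro z E _ hpre hnd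
  show CoprimeTest z E = CoprimeTest_alt z E
  rw [pvAlt_eq_gcd]
  simp only [CoprimeTest]
  have hnz : z ≠ -1 := fun h => hnd (Or.inl h)
  have hnE : E ≠ -1 := fun h => hnd (Or.inr h)
  rcases hpre with ⟨hz, hE⟩ | ⟨hz, hE, hmd⟩ | ⟨hz, hE, hmd⟩ | ⟨hz, hE, hzE⟩
  · -- both non-negative: both sides are `gcd z E == 1`
    have hA := pvLoopA_gcd (z.natAbs + E.natAbs + 1) z E hz hE (by omega)
    rw [hA]
    exact decide_eq_decide.mpr (by unfold Int.gcd; omega)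
  · -- z < 0 ≤ E with z ∣ E: A ends at (z, 0); gcd = |z| ≥ 2
    have hdvd : z ∣ E := (PySem.Int.mod_eq_zero_iff_dvd E z).mp hmd
    have hgcd : Nat.gcd z.natAbs E.natAbs = z.natAbs := pvGcdOfDvd z E hdvd
    by_cases hE0 : E = 0
    · subst hE0
      rw [pvLoopAStopRight]
      exact decide_eq_decide.mpr (by rw [hgcd]; omega)
    · obtain ⟨m, hfuel⟩ : ∃ m, z.natAbs + E.natAbs + 1 = (m + 1) + 1 :=
        ⟨z.natAbs + E.natAbs - 1, by omega⟩
      rw [hfuel, pvLoopA, if_pos ⟨by omega, by omega⟩, if_neg (by omega : ¬ z > E), hmd,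
        pvLoopAStopRight]
      exact decide_eq_decide.mpr (by rw [hgcd]; omega)
  · -- 0 ≤ z, E < 0 with E ∣ z: A ends at (0, E); gcd = |E| ≥ 2
    have hdvd : E ∣ z := (PySem.Int.mod_eq_zero_iff_dvd z E).mp hmd
    have hgcd : Nat.gcd z.natAbs E.natAbs = E.natAbs := by
      rw [Nat.gcd_comm]; exact pvGcdOfDvd E z hdvd
    by_cases hz0 : z = 0
    · subst hz0
      rw [pvLoopAStopLeft]
      exact decide_eq_decide.mpr (by rw [hgcd]; omega)
    · obtain ⟨m, hfuel⟩ : ∃ m, z.natAbs + E.natAbs + 1 = (m + 1) + 1 :=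
        ⟨z.natAbs + E.natAbs - 1, by omega⟩
      rw [hfuel, pvLoopA, if_pos ⟨by omega, by omega⟩, if_pos (by omega : z > E), hmd,
        pvLoopAStopLeft]
      exact decide_eq_decide.mpr (by rw [hgcd]; omega)
  · -- z = E < 0: A ends at (z, 0); gcd = |z| ≥ 2
    subst hzE
    obtain ⟨m, hfuel⟩ : ∃ m, z.natAbs + z.natAbs + 1 = (m + 1) + 1 :=
      ⟨z.natAbs + z.natAbs - 1, by omega⟩
    rw [hfuel, pvLoopA, if_pos ⟨by omega, by omega⟩, if_neg (by omega : ¬ z > z), pvModSelf,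
      pvLoopAStopRight]
    exact decide_eq_decide.mpr (by rw [Nat.gcd_self]; omega)

theorem CoprimeTest_changed : Claim_changed_CoprimeTest := by
  unfold Claim_changed_CoprimeTest; decide

theorem CoprimeTest_tight : Claim_exact_CoprimeTest := by
  intro z E _ hpre hd
  rw [pvAlt_eq_gcd]
  have hB : decide (Nat.gcd z.natAbs E.natAbs = 1) = true := by
    rcases hd with h | h
    · subst h; simp [Nat.gcd_one_left]
    · subst h; simp
  rw [hB]
  simp only [CoprimeTest]
  rcases hd with hz1 | hE1
  · subst hz1
    rcases hpre with ⟨hz, _⟩ | ⟨_, hE, _⟩ | ⟨hz, _, _⟩ | ⟨_, _, hzE⟩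
    · omega
    · -- z = -1, E ≥ 0
      by_cases hE0 : E = 0
      · subst hE0; rw [pvLoopAStopRight]; decide
      · obtain ⟨m, hfuel⟩ : ∃ m, (-1 : Int).natAbs + E.natAbs + 1 = (m + 1) + 1 :=
          ⟨E.natAbs, by simp only [Int.natAbs_neg, Int.natAbs_one]; omega⟩
        rw [hfuel, pvLoopA, if_pos ⟨by omega, hE0⟩, if_neg (by omega : ¬ (-1 : Int) > E),
          pvModNegOne, pvLoopAStopRight]
        simp
    · omega
    · -- z = E = -1
      rw [← hzE]; decide
  · subst hE1
    rcases hpre with ⟨_, hE⟩ | ⟨hz, hE, _⟩ | ⟨hz, _, _⟩ | ⟨hz, _, hzE⟩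
    · omega
    · -- z = -1 handled above shape: z < 0, E = -1, Pre branch 2 impossible (E ≥ 0)
      omega
    · -- z ≥ 0, E = -1
      by_cases hz0 : z = 0
      · subst hz0; rw [pvLoopAStopLeft]; decide
      · obtain ⟨m, hfuel⟩ : ∃ m, z.natAbs + (-1 : Int).natAbs + 1 = (m + 1) + 1 :=
          ⟨z.natAbs, by simp only [Int.natAbs_neg, Int.natAbs_one]⟩
        rw [hfuel, pvLoopA, if_pos ⟨hz0, by omega⟩, if_pos (by omega : z > (-1 : Int)),
          pvModNegOne, pvLoopAStopLeft]
        simp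
    · -- z = E = -1
      subst hzE; decide
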